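-- pv_equiv track=rewrite | github.com/deZakelijke/projecteuler | 51to100/52.py | check_digits
-- ===== SOURCE A (Python) =====
-- def check_digits(n,m):
--     n= str(n)
--     m = str(m)
--     for digit in n:
--         if not digit in m:
--             return False
--     for digit in m:
--         if not digit in n:
--             return False
--     return True
-- ===== SOURCE B (Python) =====
-- def check_digits(n, m):
--     # canonical form: sorted characters with adjacent duplicates collapsed
--     def profile(x):
--         out = []
--         prev = None
--         for c in sorted(str(x)):
--             if c != prev:
--                 out.append(c)
--                 prev = c
--         return out
--     return profile(n) == profile(m)
-- ===== Notes on version B (the rewrite author's own statement) =====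
-- stated objective: alternative
-- what changed: Replaces the two nested membership-scan loops with computing a canonical form per number (sort the characters, collapse adjacent duplicates in one scan) and comparing the two canonical lists for equality.
import Mathlib
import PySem

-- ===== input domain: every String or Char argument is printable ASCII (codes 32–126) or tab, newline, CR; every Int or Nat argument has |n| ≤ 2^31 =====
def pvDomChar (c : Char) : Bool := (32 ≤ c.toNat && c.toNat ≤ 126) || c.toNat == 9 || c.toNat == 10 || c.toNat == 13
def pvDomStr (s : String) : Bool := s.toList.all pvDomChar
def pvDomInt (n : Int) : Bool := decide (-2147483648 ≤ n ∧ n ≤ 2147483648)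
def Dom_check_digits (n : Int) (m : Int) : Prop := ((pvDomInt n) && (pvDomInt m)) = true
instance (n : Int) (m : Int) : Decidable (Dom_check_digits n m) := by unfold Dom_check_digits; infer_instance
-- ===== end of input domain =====

-- B compares canonical forms (sorted characters with adjacent duplicates collapsed) instead of A's two membership-scan loops (alternative algorithm).


-- ===== PORT A =====
-- one 'for digit in xs: if not digit in ys: return False' loop of A
def cdLoop (xs ys : List Char) : Bool :=
  match xs with
  | [] => true
  | c :: rest => if !(ys.contains c) then false else cdLoop rest ys

def check_digits (n : Int) (m : Int) : Bool :=
  let ns := (PySem.Int.toStr n).toList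
  let ms := (PySem.Int.toStr m).toList
  if !(cdLoop ns ms) then false
  else if !(cdLoop ms ns) then false
  else true

-- ===== PORT B =====
-- the 'for c in sorted(str(x)): if c != prev: append; prev = c' scan of Source B
def cdDedupAdj (prev : Option Char) (l : List Char) : List Char :=
  match l with
  | [] => []
  | c :: rest => if some c = prev then cdDedupAdj prev rest else c :: cdDedupAdj (some c) rest

def cdProfile (x : Int) : List Char :=
  cdDedupAdj none (PySem.List.sorted (PySem.Int.toStr x).toList (fun c => c) false)

def check_digits_alt (n : Int) (m : Int) : Bool :=
  decide (cdProfile n = cdProfile m)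

-- ===== PRECONDITION & SPEC =====
def Spec_check_digits (n : Int) (m : Int) (out : Bool) : Prop := out = check_digits_alt n m
instance (n : Int) (m : Int) (out : Bool) : Decidable (Spec_check_digits n m out) := by unfold Spec_check_digits; infer_instance

-- ===== CLAIM =====
def Claim_equal_check_digits : Prop := ∀ (n : Int) (m : Int), Dom_check_digits n m → Spec_check_digits n m (check_digits n m)

-- ===== LEMMAS AND PROOFS =====
theorem cdLoop_iff (xs ys : List Char) : cdLoop xs ys = true ↔ ∀ c ∈ xs, c ∈ ys := by
  induction xs with
  | nil => simp [cdLoop]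
  | cons c rest ih =>
    simp only [cdLoop, List.mem_cons]
    by_cases h : c ∈ ys
    · simp [h, ih]
    · simp [h]

theorem mem_cdDedupAdj (l : List Char) (prev : Option Char)
    (hs : l.Pairwise (· ≤ ·)) (hp : ∀ p, prev = some p → ∀ c ∈ l, p ≤ c) (x : Char) :
    x ∈ cdDedupAdj prev l ↔ x ∈ l ∧ some x ≠ prev := by
  induction l generalizing prev with
  | nil => simp [cdDedupAdj]
  | cons c rest ih =>
    rw [List.pairwise_cons] at hs
    simp only [cdDedupAdj]
    split_ifs with h
    · -- some c = prev: skip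
      rw [ih prev hs.2 (by intro p hpv d hd; exact hp p hpv d (List.mem_cons_of_mem _ hd))]
      constructor
      · rintro ⟨hx, hne⟩; exact ⟨List.mem_cons_of_mem _ hx, hne⟩
      · rintro ⟨hx, hne⟩
        rcases List.mem_cons.1 hx with rfl | hx
        · exact absurd h hne
        · exact ⟨hx, hne⟩
    · -- c ≠ prev: keep c
      rw [List.mem_cons, ih (some c) hs.2 (by rintro p ⟨rfl⟩ d hd; exact hs.1 d hd)]
      constructor
      · rintro (rfl | ⟨hx, hne⟩)
        · exact ⟨List.mem_cons_self .., h⟩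
        · refine ⟨List.mem_cons_of_mem _ hx, ?_⟩
          rintro rfl
          have hcx : c ≤ x := hs.1 x hx
          have hxc : x ≤ c := hp x rfl c (List.mem_cons_self ..)
          exact h (by rw [le_antisymm hcx hxc])
      · rintro ⟨hx, hne⟩
        rcases List.mem_cons.1 hx with rfl | hx
        · exact Or.inl rfl
        · by_cases hxc : x = c
          · exact Or.inl hxc
          · exact Or.inr ⟨hx, by simpa using hxc⟩

theorem pairwise_cdDedupAdj (l : List Char) (prev : Option Char)
    (hs : l.Pairwise (· ≤ ·)) (hp : ∀ p, prev = some p → ∀ c ∈ l, p ≤ c) :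
    (cdDedupAdj prev l).Pairwise (· < ·) := by
  induction l generalizing prev with
  | nil => simp [cdDedupAdj]
  | cons c rest ih =>
    rw [List.pairwise_cons] at hs
    simp only [cdDedupAdj]
    split_ifs with h
    · exact ih prev hs.2 (by intro p hpv d hd; exact hp p hpv d (List.mem_cons_of_mem _ hd))
    · refine List.pairwise_cons.2 ⟨?_, ih (some c) hs.2 (by rintro p ⟨rfl⟩ d hd; exact hs.1 d hd)⟩
      intro y hy
      have := (mem_cdDedupAdj rest (some c) hs.2 (by rintro p ⟨rfl⟩ d hd; exact hs.1 d hd) y).1 hy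
      rcases this with ⟨hyr, hne⟩
      exact lt_of_le_of_ne (hs.1 y hyr) (by simpa [eq_comm] using hne)

theorem mem_cdProfile (x : Int) (c : Char) :
    c ∈ cdProfile x ↔ c ∈ (PySem.Int.toStr x).toList := by
  unfold cdProfile
  rw [mem_cdDedupAdj _ none (PySem.List.sorted_pairwise _ _) (by rintro p ⟨⟩)]
  simp [PySem.List.mem_sorted]

theorem pairwise_cdProfile (x : Int) : (cdProfile x).Pairwise (· < ·) :=
  pairwise_cdDedupAdj _ none (PySem.List.sorted_pairwise _ _) (by rintro p ⟨⟩)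

theorem cdProfile_eq_iff (n m : Int) :
    cdProfile n = cdProfile m ↔
      ∀ c, c ∈ (PySem.Int.toStr n).toList ↔ c ∈ (PySem.Int.toStr m).toList := by
  constructor
  · intro h c; rw [← mem_cdProfile, ← mem_cdProfile, h]
  · intro h
    have hn := pairwise_cdProfile n
    have hm := pairwise_cdProfile m
    have hperm : List.Perm (cdProfile n) (cdProfile m) := by
      rw [List.perm_ext_iff_of_nodup hn.nodup hm.nodup]
      intro c; rw [mem_cdProfile, mem_cdProfile]; exact h c
    exact List.Perm.eq_of_pairwise (fun a b _ _ h1 h2 => absurd h2 (lt_asymm h1)) hn hm hperm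

-- ===== VERDICT =====
theorem check_digits_spec : Claim_equal_check_digits := by
  intro n m _
  show check_digits n m = check_digits_alt n m
  unfold check_digits check_digits_alt
  rw [Bool.eq_iff_iff]
  simp only [decide_eq_true_eq, cdProfile_eq_iff]
  constructor
  · intro h c
    split_ifs at h with h1 h2
    simp only [Bool.not_eq_true, Bool.not_eq_false', cdLoop_iff] at h1 h2
    exact ⟨fun hx => h1 c hx, fun hx => h2 c hx⟩
  · intro h
    have h1 : cdLoop (PySem.Int.toStr n).toList (PySem.Int.toStr m).toList = true :=
      (cdLoop_iff _ _).2 (fun c hc => (h c).1 hc)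
    have h2 : cdLoop (PySem.Int.toStr m).toList (PySem.Int.toStr n).toList = true :=
      (cdLoop_iff _ _).2 (fun c hc => (h c).2 hc)
    simp [PySem.Int.toStr] at h1 h2
    simp [h1, h2]
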